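-- pv_equiv track=rewrite | github.com/NVIDIA/nv-air-sdk | src/air_sdk/utils.py | calculate_multipart_info
-- ===== SOURCE A (Python) =====
-- def calculate_multipart_info(file_size: int, chunk_size: int) -> list[dict[str, int]]:
--     """Calculate part information for multipart upload.
--
--     Args:
--         file_size: Total size of the file in bytes
--         chunk_size: Size of each chunk in bytes
--
--     Returns:
--         List of dictionaries containing part info with keys:
--         - part_number: 1-based part number
--         - start: Start byte offset
--         - size: Size of this part in bytes
--     """
--     parts = []
--     part_number = 1
--     offset = 0
--
--     while offset < file_size:
--         part_size = min(chunk_size, file_size - offset)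
--         parts.append({'part_number': part_number, 'start': offset, 'size': part_size})
--         offset += part_size
--         part_number += 1
--
--     return parts
-- ===== SOURCE B (Python) =====
-- def calculate_multipart_info(file_size: int, chunk_size: int) -> list[dict[str, int]]:
--     if file_size <= 0:
--         return []
--     n_parts = (file_size + chunk_size - 1) // chunk_size
--     return [
--         {'part_number': i + 1,
--          'start': i * chunk_size,
--          'size': min(chunk_size, file_size - i * chunk_size)}
--         for i in range(n_parts)
--     ]
-- ===== Notes on version B (the rewrite author's own statement) =====
-- stated objective: simpler
-- what changed: Replaces the offset/part_number accumulator while-loop with a precomputed ceil-division part count and a single comprehension computing each part from its index.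
import Mathlib
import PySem

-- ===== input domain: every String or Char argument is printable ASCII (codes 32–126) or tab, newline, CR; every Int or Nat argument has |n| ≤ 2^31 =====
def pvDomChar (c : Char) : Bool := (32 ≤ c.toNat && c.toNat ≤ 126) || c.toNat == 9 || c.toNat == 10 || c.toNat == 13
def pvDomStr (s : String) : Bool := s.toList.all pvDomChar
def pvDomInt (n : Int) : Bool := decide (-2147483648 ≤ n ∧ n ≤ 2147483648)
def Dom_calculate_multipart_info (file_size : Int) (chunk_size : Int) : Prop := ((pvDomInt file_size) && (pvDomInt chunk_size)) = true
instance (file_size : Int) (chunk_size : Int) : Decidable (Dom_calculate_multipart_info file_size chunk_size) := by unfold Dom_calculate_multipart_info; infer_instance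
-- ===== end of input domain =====

-- B replaces A's offset/part_number accumulator loop with a precomputed ceil-division
-- part count plus one comprehension over the part index (objective: simpler).

-- ===== PORT A =====
-- A's while-loop; the inner dite guard only makes the recursion total: when
-- part_size ≤ 0 the Python loop never terminates (those inputs are outside Pre_).
def pvLoopA (file_size chunk_size offset part_number : Int)
    (parts : List (List (String × Int))) : List (List (String × Int)) :=
  if _h : offset < file_size then
    if _hp : 0 < min chunk_size (file_size - offset) then
      pvLoopA file_size chunk_size (offset + min chunk_size (file_size - offset))
        (part_number + 1)
        (parts ++ [[("part_number", part_number), ("start", offset),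
                    ("size", min chunk_size (file_size - offset))]])
    else
      parts ++ [[("part_number", part_number), ("start", offset),
                 ("size", min chunk_size (file_size - offset))]]
  else parts
termination_by (file_size - offset).toNat
decreasing_by omega

def calculate_multipart_info (file_size : Int) (chunk_size : Int) : List (List (String × Int)) :=
  pvLoopA file_size chunk_size 0 1 []

-- ===== PORT B =====
def pvPart (file_size chunk_size i : Int) : List (String × Int) :=
  [("part_number", i + 1), ("start", i * chunk_size),
   ("size", min chunk_size (file_size - i * chunk_size))]

def calculate_multipart_info_alt (file_size : Int) (chunk_size : Int) : List (List (String × Int)) :=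
  if file_size ≤ 0 then []
  else
    (PySem.List.pyRange 0 (PySem.Int.floordiv (file_size + chunk_size - 1) chunk_size) 1).map
      (pvPart file_size chunk_size)

-- ===== PRECONDITION & SPEC =====
-- Pre_ excludes only file_size > 0 with chunk_size ≤ 0: there A's while-loop never
-- terminates (part_size ≤ 0, offset never grows), so A returns nothing to match.
def Pre_calculate_multipart_info (file_size : Int) (chunk_size : Int) : Prop :=
  file_size ≤ 0 ∨ 0 < chunk_size
instance (file_size : Int) (chunk_size : Int) : Decidable (Pre_calculate_multipart_info file_size chunk_size) := by unfold Pre_calculate_multipart_info; infer_instance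

def pvWitness_calculate_multipart_info : Int × Int := (10, 4)

def Spec_calculate_multipart_info (file_size : Int) (chunk_size : Int) (out : List (List (String × Int))) : Prop := out = calculate_multipart_info_alt file_size chunk_size
instance (file_size : Int) (chunk_size : Int) (out : List (List (String × Int))) : Decidable (Spec_calculate_multipart_info file_size chunk_size out) := by unfold Spec_calculate_multipart_info; infer_instance

-- ===== CLAIM (what is proved, stated in full; the proofs are below) =====
def Claim_equal_calculate_multipart_info : Prop := ∀ (file_size : Int) (chunk_size : Int), Dom_calculate_multipart_info file_size chunk_size → Pre_calculate_multipart_info file_size chunk_size → Spec_calculate_multipart_info file_size chunk_size (calculate_multipart_info file_size chunk_size)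

-- ===== LEMMAS AND PROOFS =====

-- Loop invariant: after k full chunks, offset = k*cs and part_number = k+1, and the
-- loop appends exactly the parts for indices k, k+1, … of B's range.
lemma pvLoopA_eq (fs cs : Int) (hcs : 0 < cs) (m : Nat) :
    ∀ (k : Int), 0 ≤ k → fs - k * cs ≤ (m : Int) →
    ∀ (acc : List (List (String × Int))),
      pvLoopA fs cs (k * cs) (k + 1) acc
        = acc ++ (PySem.List.pyRange k (PySem.Int.floordiv (fs + cs - 1) cs) 1).map
            (pvPart fs cs) := by
  induction m with
  | zero =>
    intro k hk hm acc
    have hstop : ¬ k * cs < fs := by omega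
    have hn : PySem.Int.floordiv (fs + cs - 1) cs < k + 1 := by
      rw [PySem.Int.floordiv_lt_iff_lt_mul hcs]
      have : (k + 1) * cs = k * cs + cs := by ring
      omega
    rw [pvLoopA, dif_neg hstop, PySem.List.pyRange_one_eq_nil (by omega)]
    simp
  | succ m ih =>
    intro k hk hm acc
    by_cases hlt : k * cs < fs
    · have hpos : 0 < min cs (fs - k * cs) := by omega
      have hkn : k < PySem.Int.floordiv (fs + cs - 1) cs := by
        have h2 : k + 1 ≤ PySem.Int.floordiv (fs + cs - 1) cs := by
          rw [PySem.Int.le_floordiv_iff_mul_le hcs]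
          have he : (k + 1) * cs = k * cs + cs := by ring
          omega
        omega
      rw [pvLoopA, dif_pos hlt, dif_pos hpos,
          PySem.List.pyRange_one_cons hkn]
      by_cases hbig : cs ≤ fs - k * cs
      · have hmin : min cs (fs - k * cs) = cs := by omega
        have hoff : k * cs + min cs (fs - k * cs) = (k + 1) * cs := by rw [hmin]; ring
        rw [hoff]
        have := ih (k + 1) (by omega) (by
          have : (k + 1) * cs = k * cs + cs := by ring
          omega) (acc ++ [[("part_number", k + 1), ("start", k * cs),
                           ("size", min cs (fs - k * cs))]])
        rw [this]
        simp [pvPart]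
      · -- last, short part: offset jumps to fs and the loop stops
        have hmin : min cs (fs - k * cs) = fs - k * cs := by omega
        have hoff : k * cs + min cs (fs - k * cs) = fs := by rw [hmin]; ring
        rw [hoff, pvLoopA, dif_neg (lt_irrefl fs)]
        have hn : PySem.Int.floordiv (fs + cs - 1) cs < k + 1 + 1 := by
          rw [PySem.Int.floordiv_lt_iff_lt_mul hcs]
          have : (k + 1 + 1) * cs = k * cs + cs + cs := by ring
          omega
        rw [PySem.List.pyRange_one_eq_nil (by omega)]
        simp [pvPart]
    · have hn : PySem.Int.floordiv (fs + cs - 1) cs < k + 1 := by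
        rw [PySem.Int.floordiv_lt_iff_lt_mul hcs]
        have : (k + 1) * cs = k * cs + cs := by ring
        omega
      rw [pvLoopA, dif_neg hlt, PySem.List.pyRange_one_eq_nil (by omega)]
      simp

-- ===== VERDICT (by name: the statement is the Claim_ definition above) =====
theorem calculate_multipart_info_spec : Claim_equal_calculate_multipart_info := by
  intro fs cs _hdom hpre
  unfold Spec_calculate_multipart_info calculate_multipart_info calculate_multipart_info_alt
  by_cases hfs : fs ≤ 0
  · rw [pvLoopA, dif_neg (by omega), if_pos hfs]
  · have hcs : 0 < cs := by rcases hpre with h | h <;> omega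
    have h0 : pvLoopA fs cs 0 1 ([] : List (List (String × Int))) = pvLoopA fs cs (0 * cs) (0 + 1) [] := by norm_num
    rw [h0, pvLoopA_eq fs cs hcs fs.toNat 0 le_rfl (by omega), if_neg hfs]
    simp
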